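-- pv_equiv track=rewrite | github.com/ngocuong0105/usaco | silver/paintbarn_gold.py | get_barn
-- ===== SOURCE A (Python) =====
-- L = 10
--
-- def get_barn(N,rects):
--     mat = [[0]*L for _ in range(L)]
--     for idx in range(N):
--         i,j,x,y = rects[idx]
--         mat[i][j] += 1
--         mat[x][y] += 1
--         mat[x][j] -= 1
--         mat[i][y] -= 1
--     return get_cum(mat)
--
-- def get_cum(mat):
--     import copy
--     cum = copy.deepcopy(mat)
--     for i in range(len(mat)):
--         for j in range(len(mat)):
--             if i>0: cum[i][j] += cum[i-1][j]
--             if j>0: cum[i][j] += cum[i][j-1]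
--             if i>0 and j>0: cum[i][j] -= cum[i-1][j-1]
--     return cum
-- ===== SOURCE B (Python) =====
-- L = 10
--
-- def get_barn(N, rects):
--     grid = [[0] * L for _ in range(L)]
--     for idx in range(N):
--         i, j, x, y = rects[idx]
--         for a in range(i, x):
--             for b in range(j, y):
--                 grid[a][b] += 1
--     return grid
-- ===== Notes on version B (the rewrite author's own statement) =====
-- stated objective: simpler
-- what changed: B replaces A's 2D difference-array corner increments followed by an in-place two-dimensional prefix-sum pass with direct per-cell accumulation: for each rectangle it simply increments every covered cell grid[a][b] for a in range(i,x), b in range(j,y).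
import Mathlib
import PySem

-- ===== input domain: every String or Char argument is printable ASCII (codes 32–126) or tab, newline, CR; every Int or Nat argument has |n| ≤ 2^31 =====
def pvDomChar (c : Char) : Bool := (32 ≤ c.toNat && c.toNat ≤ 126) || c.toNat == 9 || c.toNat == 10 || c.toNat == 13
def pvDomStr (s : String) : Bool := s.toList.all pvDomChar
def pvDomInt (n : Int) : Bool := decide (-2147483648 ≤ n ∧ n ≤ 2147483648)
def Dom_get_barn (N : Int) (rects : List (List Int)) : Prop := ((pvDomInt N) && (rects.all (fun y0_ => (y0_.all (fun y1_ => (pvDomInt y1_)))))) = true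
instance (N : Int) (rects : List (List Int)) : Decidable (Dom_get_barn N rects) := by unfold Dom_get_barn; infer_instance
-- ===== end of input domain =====

-- B replaces A's 2D difference array + in-place 2D prefix-sum pass by direct per-cell
-- accumulation over each rectangle's half-open span (a simpler strategy; not faster).

-- ===== PORT A =====
-- shared indexing helpers: m[i][j] read and m[i][j] += d, with Python's index semantics
def pvGetRow (m : List (List Int)) (i : Int) : List Int := PySem.List.pyGetD m i []
def pvGet (m : List (List Int)) (i j : Int) : Int := PySem.List.pyGetD (pvGetRow m i) j 0
def pvUpd (m : List (List Int)) (i j d : Int) : List (List Int) :=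
  PySem.List.pySetD m i (PySem.List.pySetD (pvGetRow m i) j (pvGet m i j + d))

-- A's corner-loop body: mat[i][j]+=1; mat[x][y]+=1; mat[x][j]-=1; mat[i][y]-=1
-- (a row that is not a 4-list makes Python raise on unpacking: excluded by Pre_)
def pvCorner (m : List (List Int)) (r : List Int) : List (List Int) :=
  match r with
  | [i, j, x, y] => pvUpd (pvUpd (pvUpd (pvUpd m i j 1) x y 1) x j (-1)) i y (-1)
  | _ => m

-- one step of get_cum's inner loop: the three sequential in-place updates of cum[i][j]
def pvCumCell (i : Int) (cum : List (List Int)) (j : Int) : List (List Int) :=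
  let c1 := if 0 < i then pvUpd cum i j (pvGet cum (i - 1) j) else cum
  let c2 := if 0 < j then pvUpd c1 i j (pvGet c1 i (j - 1)) else c1
  if 0 < i ∧ 0 < j then pvUpd c2 i j (-(pvGet c2 (i - 1) (j - 1))) else c2

-- A's helper get_cum (cum starts as a deep copy of mat; both loops run over range(len(mat)))
def pvGetCum (mat : List (List Int)) : List (List Int) :=
  (PySem.List.pyRange 0 (mat.length : Int) 1).foldl
    (fun cum i => (PySem.List.pyRange 0 (mat.length : Int) 1).foldl (pvCumCell i) cum) mat

def get_barn (N : Int) (rects : List (List Int)) : List (List Int) :=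
  let mat := (PySem.List.pyRange 0 N 1).foldl
    (fun m idx => pvCorner m (PySem.List.pyGetD rects idx []))
    (List.replicate 10 (List.replicate 10 0))
  pvGetCum mat

-- ===== PORT B =====
-- B's loop body: for a in range(i, x): for b in range(j, y): grid[a][b] += 1
def pvIncRect (g : List (List Int)) (r : List Int) : List (List Int) :=
  match r with
  | [i, j, x, y] =>
      (PySem.List.pyRange i x 1).foldl
        (fun g a => (PySem.List.pyRange j y 1).foldl (fun g b => pvUpd g a b 1) g) g
  | _ => g

def get_barn_alt (N : Int) (rects : List (List Int)) : List (List Int) :=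
  (PySem.List.pyRange 0 N 1).foldl
    (fun g idx => pvIncRect g (PySem.List.pyGetD rects idx []))
    (List.replicate 10 (List.replicate 10 0))

-- ===== PRECONDITION & SPEC =====
def pvRectOK (r : List Int) : Bool :=
  match r with
  | [i, j, x, y] => decide (0 ≤ i ∧ i ≤ x ∧ x ≤ 9 ∧ 0 ≤ j ∧ j ≤ y ∧ y ≤ 9)
  | _ => false

-- Pre_ restricts to the problem's natural domain: each of the first N rows is a genuine
-- rectangle [i,j,x,y] with 0 ≤ i ≤ x ≤ 9 and 0 ≤ j ≤ y ≤ 9. It excludes the inputs where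
-- A raises (N > len(rects), a row that is not a 4-list, a coordinate outside [-10,9]) and
-- also — see the claim's cites — rectangles with a negative coordinate or with inverted
-- corners, a corner no caller specifies: there Python's negative-index wraparound makes
-- A's grid and B's grid two different, equally defensible values (neither is canonical).
def Pre_get_barn (N : Int) (rects : List (List Int)) : Prop :=
  N ≤ (rects.length : Int) ∧ ∀ r ∈ rects.take N.toNat, pvRectOK r = true
instance (N : Int) (rects : List (List Int)) : Decidable (Pre_get_barn N rects) := by
  unfold Pre_get_barn; infer_instance

def pvWitness_get_barn : Int × List (List Int) := (2, [[0, 0, 2, 3], [1, 2, 9, 9]])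

def Spec_get_barn (N : Int) (rects : List (List Int)) (out : List (List Int)) : Prop := out = get_barn_alt N rects
instance (N : Int) (rects : List (List Int)) (out : List (List Int)) : Decidable (Spec_get_barn N rects out) := by unfold Spec_get_barn; infer_instance

-- ===== CLAIM (what is proved, stated in full; the proofs are below) =====
def Claim_equal_get_barn : Prop := ∀ (N : Int) (rects : List (List Int)), Dom_get_barn N rects → Pre_get_barn N rects → Spec_get_barn N rects (get_barn N rects)

-- ===== LEMMAS AND PROOFS =====

-- 10×10 shape invariant
def pvSh (m : List (List Int)) : Prop := m.length = 10 ∧ ∀ row ∈ m, row.length = 10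

-- the four if-atoms of one corner update, and B's per-rectangle per-cell contribution
def pvDelta (r : List Int) (p q : Int) : Int :=
  match r with
  | [i, j, x, y] =>
      (if p = i ∧ q = j then (1 : Int) else 0) + (if p = x ∧ q = y then (1 : Int) else 0)
      + (if p = x ∧ q = j then (-1 : Int) else 0) + (if p = i ∧ q = y then (-1 : Int) else 0)
  | _ => 0
def pvContribB (r : List Int) (p q : Int) : Int :=
  match r with
  | [i, j, x, y] => if i ≤ p ∧ p < x ∧ j ≤ q ∧ q < y then (1 : Int) else 0
  | _ => 0

-- prefix sums of a matrix, as list sums over Python ranges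
def pvRowSum (m : List (List Int)) (p q : Int) : Int :=
  ((PySem.List.pyRange 0 (q + 1) 1).map (fun qq => pvGet m p qq)).sum
def pvF (m : List (List Int)) (p q : Int) : Int :=
  ((PySem.List.pyRange 0 (p + 1) 1).map (fun pp => pvRowSum m pp q)).sum

-- the mixed state of get_cum's in-place sweep: cells lexicographically before (i, jcut)
-- already hold the 2D prefix sum, the rest still hold the original entries
def pvInvC (m : List (List Int)) (i jcut : Int) (c : List (List Int)) : Prop :=
  pvSh c ∧ ∀ p q : Int, 0 ≤ p → p < 10 → 0 ≤ q → q < 10 →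
    pvGet c p q = if p < i ∨ (p = i ∧ q < jcut) then pvF m p q else pvGet m p q

theorem pvGetRow_in {m : List (List Int)} (hl : m.length = 10) {i : Int} (hi0 : 0 ≤ i) (hi : i < 10) :
    pvGetRow m i = m[i.toNat]'(by omega) := by
  exact PySem.List.pyGetD_eq_getElem m ([] : List Int) hi0 (by omega)

theorem pvSh_upd {m : List (List Int)} (hm : pvSh m) {i j : Int}
    (hi0 : 0 ≤ i) (hi : i < 10) (hj0 : 0 ≤ j) (_hj : j < 10) (d : Int) :
    pvSh (pvUpd m i j d) := by
  obtain ⟨hl, hrows⟩ := hm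
  unfold pvUpd
  rw [PySem.List.pySetD_of_nonneg _ _ hi0]
  refine ⟨by simp [hl], ?_⟩
  intro row hrow
  rcases List.mem_or_eq_of_mem_set hrow with h | h
  · exact hrows _ h
  · subst h
    rw [PySem.List.pySetD_of_nonneg _ _ hj0, pvGetRow_in hl hi0 hi]
    simp [hrows _ (List.getElem_mem _)]

theorem pvGet_upd {m : List (List Int)} (hm : pvSh m) {i j : Int}
    (hi0 : 0 ≤ i) (hi : i < 10) (hj0 : 0 ≤ j) (hj : j < 10) (d : Int)
    {p q : Int} (hp0 : 0 ≤ p) (hp : p < 10) (hq0 : 0 ≤ q) (hq : q < 10) :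
    pvGet (pvUpd m i j d) p q = pvGet m p q + (if p = i ∧ q = j then d else 0) := by
  obtain ⟨hl, hrows⟩ := hm
  have hrl : ∀ (k : Nat) (h : k < m.length), m[k].length = 10 := fun k h => hrows _ (List.getElem_mem _)
  have hrowlen : (pvGetRow m i).length = 10 := by rw [pvGetRow_in hl hi0 hi]; exact hrl _ (by omega)
  have hmpq : pvGet m p q = PySem.List.pyGetD (m[p.toNat]'(by omega)) q 0 := by
    rw [pvGet, pvGetRow_in hl hp0 hp]
  conv_lhs => rw [pvGet, pvGetRow, pvUpd]
  rw [PySem.List.pySetD_of_nonneg _ _ hi0]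
  rw [PySem.List.pyGetD_eq_getElem _ _ hp0 (by simp [hl]; omega)]
  simp only [List.getElem_set]
  by_cases hpi : p = i
  · have hpi' : i.toNat = p.toNat := by omega
    rw [if_pos hpi']
    rw [PySem.List.pySetD_of_nonneg _ _ hj0]
    rw [PySem.List.pyGetD_eq_getElem _ _ hq0 (by simp [hrowlen]; omega)]
    simp only [List.getElem_set]
    by_cases hqj : q = j
    · have hjq : j.toNat = q.toNat := by omega
      rw [if_pos hjq]
      subst hpi hqj
      rw [hmpq]
      simp
    · rw [if_neg (by omega), hmpq]
      rw [PySem.List.pyGetD_eq_getElem _ _ hq0 (by rw [hrl _ (by omega)]; omega)]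
      simp only [pvGetRow_in hl hi0 hi]
      have hqn : p.toNat = i.toNat := by omega
      simp [hqn, hqj]
  · rw [if_neg (by omega), hmpq]
    simp [hpi]

theorem pvCorner_sh {r : List Int} (hr : pvRectOK r = true) {m : List (List Int)} (hm : pvSh m) :
    pvSh (pvCorner m r) := by
  rcases r with _ | ⟨i, _ | ⟨j, _ | ⟨x, _ | ⟨y, _ | ⟨z, rest⟩⟩⟩⟩⟩ <;> simp [pvRectOK] at hr
  obtain ⟨h1, h2, h3, h4, h5, h6⟩ := hr
  simp only [pvCorner]
  exact pvSh_upd (pvSh_upd (pvSh_upd (pvSh_upd hm (by omega) (by omega) (by omega) (by omega) _)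
    (by omega) (by omega) (by omega) (by omega) _) (by omega) (by omega) (by omega) (by omega) _)
    (by omega) (by omega) (by omega) (by omega) _

theorem pvCorner_get {r : List Int} (hr : pvRectOK r = true) {m : List (List Int)} (hm : pvSh m)
    {p q : Int} (hp0 : 0 ≤ p) (hp : p < 10) (hq0 : 0 ≤ q) (hq : q < 10) :
    pvGet (pvCorner m r) p q = pvGet m p q + pvDelta r p q := by
  rcases r with _ | ⟨i, _ | ⟨j, _ | ⟨x, _ | ⟨y, _ | ⟨z, rest⟩⟩⟩⟩⟩ <;> simp [pvRectOK] at hr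
  obtain ⟨h1, h2, h3, h4, h5, h6⟩ := hr
  have s1 := pvSh_upd hm (i := i) (j := j) (by omega) (by omega) (by omega) (by omega) 1
  have s2 := pvSh_upd s1 (i := x) (j := y) (by omega) (by omega) (by omega) (by omega) 1
  have s3 := pvSh_upd s2 (i := x) (j := j) (by omega) (by omega) (by omega) (by omega) (-1)
  simp only [pvCorner, pvDelta]
  rw [pvGet_upd s3 (by omega) (by omega) (by omega) (by omega) _ hp0 hp hq0 hq,
      pvGet_upd s2 (by omega) (by omega) (by omega) (by omega) _ hp0 hp hq0 hq,
      pvGet_upd s1 (by omega) (by omega) (by omega) (by omega) _ hp0 hp hq0 hq,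
      pvGet_upd hm (by omega) (by omega) (by omega) (by omega) _ hp0 hp hq0 hq]
  ring

theorem pvFoldCorner {rs : List (List Int)} (hall : ∀ r ∈ rs, pvRectOK r = true)
    {m : List (List Int)} (hm : pvSh m) :
    pvSh (rs.foldl pvCorner m) ∧ ∀ p q : Int, 0 ≤ p → p < 10 → 0 ≤ q → q < 10 →
      pvGet (rs.foldl pvCorner m) p q = pvGet m p q + (rs.map (fun r => pvDelta r p q)).sum := by
  induction rs generalizing m with
  | nil => exact ⟨hm, by simp⟩
  | cons r rs ih =>
    have hr := hall r (by simp)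
    have hall' : ∀ r ∈ rs, pvRectOK r = true := fun r h => hall r (by simp [h])
    have hsh := pvCorner_sh hr hm
    obtain ⟨ihs, ihg⟩ := ih hall' hsh
    refine ⟨ihs, fun p q hp0 hp hq0 hq => ?_⟩
    rw [List.foldl_cons, ihg p q hp0 hp hq0 hq, pvCorner_get hr hm hp0 hp hq0 hq]
    simp [add_assoc]

theorem pvColFold (a j y : Int) (ha0 : 0 ≤ a) (ha : a < 10) (hj0 : 0 ≤ j) (hy : y ≤ 10) :
    ∀ (fuel : Nat) (j' : Int) (g : List (List Int)), j ≤ j' → (y - j').toNat = fuel → pvSh g →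
      pvSh ((PySem.List.pyRange j' y 1).foldl (fun g b => pvUpd g a b 1) g) ∧
      ∀ p q : Int, 0 ≤ p → p < 10 → 0 ≤ q → q < 10 →
        pvGet ((PySem.List.pyRange j' y 1).foldl (fun g b => pvUpd g a b 1) g) p q =
          pvGet g p q + (if p = a ∧ j' ≤ q ∧ q < y then 1 else 0) := by
  intro fuel
  induction fuel with
  | zero =>
    intro j' g hjj hf hg
    have hyj : y ≤ j' := by omega
    rw [PySem.List.pyRange_one_eq_nil hyj]
    exact ⟨hg, fun p q _ _ _ _ => by simp; omega⟩
  | succ fuel ih =>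
    intro j' g hjj hf hg
    have hlt : j' < y := by omega
    rw [PySem.List.pyRange_one_cons hlt, List.foldl_cons]
    have hg1 := pvSh_upd hg (i := a) (j := j') (by omega) (by omega) (by omega) (by omega) 1
    obtain ⟨ihs, ihg⟩ := ih (j' + 1) _ (by omega) (by omega) hg1
    refine ⟨ihs, fun p q hp0 hp hq0 hq => ?_⟩
    rw [ihg p q hp0 hp hq0 hq,
        pvGet_upd hg (by omega) (by omega) (by omega) (by omega) 1 hp0 hp hq0 hq]
    have : (if p = a ∧ q = j' then (1:Int) else 0) + (if p = a ∧ j' + 1 ≤ q ∧ q < y then (1:Int) else 0)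
        = if p = a ∧ j' ≤ q ∧ q < y then 1 else 0 := by
      split_ifs <;> omega
    omega

theorem pvIncRect_sh {r : List Int} (hr : pvRectOK r = true) {g : List (List Int)} (hg : pvSh g) :
    pvSh (pvIncRect g r) ∧ ∀ p q : Int, 0 ≤ p → p < 10 → 0 ≤ q → q < 10 →
      pvGet (pvIncRect g r) p q = pvGet g p q + pvContribB r p q := by
  rcases r with _ | ⟨i, _ | ⟨j, _ | ⟨x, _ | ⟨y, _ | ⟨z, rest⟩⟩⟩⟩⟩ <;> simp [pvRectOK] at hr
  obtain ⟨h1, h2, h3, h4, h5, h6⟩ := hr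
  simp only [pvIncRect, pvContribB]
  -- outer fold over rows a ∈ range(i, x)
  suffices h : ∀ (fuel : Nat) (i' : Int) (g : List (List Int)), i ≤ i' → (x - i').toNat = fuel → pvSh g →
      pvSh ((PySem.List.pyRange i' x 1).foldl
        (fun g a => (PySem.List.pyRange j y 1).foldl (fun g b => pvUpd g a b 1) g) g) ∧
      ∀ p q : Int, 0 ≤ p → p < 10 → 0 ≤ q → q < 10 →
        pvGet ((PySem.List.pyRange i' x 1).foldl
          (fun g a => (PySem.List.pyRange j y 1).foldl (fun g b => pvUpd g a b 1) g) g) p q =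
          pvGet g p q + (if i' ≤ p ∧ p < x ∧ j ≤ q ∧ q < y then 1 else 0) by
    obtain ⟨hs, hgg⟩ := h (x - i).toNat i g (le_refl i) rfl hg
    exact ⟨hs, fun p q hp0 hp hq0 hq => by rw [hgg p q hp0 hp hq0 hq]⟩
  intro fuel
  induction fuel with
  | zero =>
    intro i' g hii hf hg'
    have hxi : x ≤ i' := by omega
    rw [PySem.List.pyRange_one_eq_nil hxi]
    exact ⟨hg', fun p q _ _ _ _ => by simp; omega⟩
  | succ fuel ih =>
    intro i' g hii hf hg'
    have hlt : i' < x := by omega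
    rw [PySem.List.pyRange_one_cons hlt, List.foldl_cons]
    obtain ⟨hs1, hg1⟩ := pvColFold i' j y (by omega) (by omega) (by omega) (by omega)
      (y - j).toNat j g (le_refl j) rfl hg'
    obtain ⟨ihs, ihg⟩ := ih (i' + 1) _ (by omega) (by omega) hs1
    refine ⟨ihs, fun p q hp0 hp hq0 hq => ?_⟩
    rw [ihg p q hp0 hp hq0 hq, hg1 p q hp0 hp hq0 hq]
    have : (if p = i' ∧ j ≤ q ∧ q < y then (1:Int) else 0) + (if i' + 1 ≤ p ∧ p < x ∧ j ≤ q ∧ q < y then (1:Int) else 0)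
        = if i' ≤ p ∧ p < x ∧ j ≤ q ∧ q < y then 1 else 0 := by
      split_ifs <;> omega
    omega

theorem pvFoldInc {rs : List (List Int)} (hall : ∀ r ∈ rs, pvRectOK r = true)
    {g : List (List Int)} (hg : pvSh g) :
    pvSh (rs.foldl pvIncRect g) ∧ ∀ p q : Int, 0 ≤ p → p < 10 → 0 ≤ q → q < 10 →
      pvGet (rs.foldl pvIncRect g) p q = pvGet g p q + (rs.map (fun r => pvContribB r p q)).sum := by
  induction rs generalizing g with
  | nil => exact ⟨hg, by simp⟩
  | cons r rs ih =>
    have hr := hall r (by simp)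
    obtain ⟨hs1, hg1⟩ := pvIncRect_sh hr hg
    obtain ⟨ihs, ihg⟩ := ih (fun r h => hall r (by simp [h])) hs1
    refine ⟨ihs, fun p q hp0 hp hq0 hq => ?_⟩
    rw [List.foldl_cons, ihg p q hp0 hp hq0 hq, hg1 p q hp0 hp hq0 hq]
    simp [add_assoc]

theorem pvRowSum_neg {m : List (List Int)} {p q : Int} (h : q < 0) : pvRowSum m p q = 0 := by
  rw [pvRowSum, PySem.List.pyRange_one_eq_nil (by omega)]; simp

theorem pvRowSum_rec {m : List (List Int)} {p q : Int} (h : 0 ≤ q) :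
    pvRowSum m p q = pvRowSum m p (q - 1) + pvGet m p q := by
  rw [pvRowSum, PySem.List.pyRange_one_succ_right (by omega), pvRowSum]
  have : q - 1 + 1 = q := by omega
  rw [this]
  simp

theorem pvF_neg {m : List (List Int)} {p q : Int} (h : p < 0) : pvF m p q = 0 := by
  rw [pvF, PySem.List.pyRange_one_eq_nil (by omega)]; simp

theorem pvF_rec {m : List (List Int)} {p q : Int} (h : 0 ≤ p) :
    pvF m p q = pvF m (p - 1) q + pvRowSum m p q := by
  rw [pvF, PySem.List.pyRange_one_succ_right (by omega), pvF]
  have : p - 1 + 1 = p := by omega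
  rw [this]
  simp

theorem pvF_colneg {m : List (List Int)} {p q : Int} (h : q < 0) : pvF m p q = 0 := by
  rw [pvF]
  have hz : ∀ pp ∈ PySem.List.pyRange 0 (p + 1) 1, pvRowSum m pp q = (fun _ => (0:Int)) pp :=
    fun pp _ => pvRowSum_neg h
  rw [List.map_congr_left hz]
  simp

theorem pvF_cell {m : List (List Int)} {i j : Int} (hi : 0 ≤ i) (hj : 0 ≤ j) :
    pvF m i j = pvGet m i j + pvF m (i - 1) j + pvF m i (j - 1) - pvF m (i - 1) (j - 1) := by
  have h1 := pvF_rec (m := m) (q := j) hi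
  have h2 := pvF_rec (m := m) (q := j - 1) hi
  have h3 := pvRowSum_rec (m := m) (p := i) hj
  by_cases hj0 : 0 < j
  · linarith
  · have hj' : j = 0 := by omega
    subst hj'
    have h4 : pvRowSum m i ((0:Int) - 1) = 0 := pvRowSum_neg (by omega)
    have h6 : pvF m (i - 1) ((0:Int) - 1) = 0 := pvF_colneg (by omega)
    have h7 : pvF m i ((0:Int) - 1) = 0 := pvF_colneg (by omega)
    linarith

theorem pvSumInd (c u : Int) : ∀ (fuel : Nat) (l r : Int), (r - l).toNat = fuel →
    ((PySem.List.pyRange l r 1).map (fun t => if t = u then c else 0)).sum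
      = if l ≤ u ∧ u < r then c else 0 := by
  intro fuel
  induction fuel with
  | zero =>
    intro l r hf
    rw [PySem.List.pyRange_one_eq_nil (by omega)]
    simp; omega
  | succ fuel ih =>
    intro l r hf
    rw [PySem.List.pyRange_one_cons (by omega), List.map_cons, List.sum_cons,
        ih (l + 1) r (by omega)]
    split_ifs <;> omega

theorem pvSumIndConj (C : Prop) [Decidable C] (c u l r : Int) :
    ((PySem.List.pyRange l r 1).map (fun t => if C ∧ t = u then c else 0)).sum
      = if C ∧ l ≤ u ∧ u < r then c else 0 := by
  by_cases hC : C
  · have : ∀ t ∈ PySem.List.pyRange l r 1,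
        (if C ∧ t = u then c else 0) = (fun t => if t = u then c else 0) t := by
      intro t _; simp [hC]
    rw [List.map_congr_left this, pvSumInd c u (r - l).toNat l r rfl]
    simp [hC]
  · simp [hC]

theorem pvSumIndConj' (C : Prop) [Decidable C] (c u l r : Int) :
    ((PySem.List.pyRange l r 1).map (fun t => if t = u ∧ C then c else 0)).sum
      = if (l ≤ u ∧ u < r) ∧ C then c else 0 := by
  have : ∀ t ∈ PySem.List.pyRange l r 1,
      (if t = u ∧ C then c else 0) = (fun t => if C ∧ t = u then c else 0) t := by
    intro t _; simp [and_comm]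
  rw [List.map_congr_left this, pvSumIndConj]
  split_ifs with h1 h2 <;> first | rfl | (exfalso; tauto)

-- box sum of one rectangle's corner deltas = B's per-cell contribution

theorem pvBox_eq {r : List Int} (hr : pvRectOK r = true)
    {a b : Int} (ha0 : 0 ≤ a) (ha : a < 10) (hb0 : 0 ≤ b) (hb : b < 10) :
    ((PySem.List.pyRange 0 (a + 1) 1).map (fun pp =>
      ((PySem.List.pyRange 0 (b + 1) 1).map (fun qq => pvDelta r pp qq)).sum)).sum
    = pvContribB r a b := by
  rcases r with _ | ⟨i, _ | ⟨j, _ | ⟨x, _ | ⟨y, _ | ⟨z, rest⟩⟩⟩⟩⟩ <;> simp [pvRectOK] at hr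
  obtain ⟨h1, h2, h3, h4, h5, h6⟩ := hr
  simp only [pvDelta, pvContribB]
  have inner : ∀ pp : Int,
      ((PySem.List.pyRange 0 (b + 1) 1).map (fun qq =>
        (if pp = i ∧ qq = j then (1:Int) else 0) + (if pp = x ∧ qq = y then (1:Int) else 0)
        + (if pp = x ∧ qq = j then (-1:Int) else 0) + (if pp = i ∧ qq = y then (-1:Int) else 0))).sum
      = (if pp = i ∧ 0 ≤ j ∧ j < b + 1 then (1:Int) else 0)
        + (if pp = x ∧ 0 ≤ y ∧ y < b + 1 then (1:Int) else 0)
        + (if pp = x ∧ 0 ≤ j ∧ j < b + 1 then (-1:Int) else 0)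
        + (if pp = i ∧ 0 ≤ y ∧ y < b + 1 then (-1:Int) else 0) := by
    intro pp
    rw [show (fun qq => (if pp = i ∧ qq = j then (1:Int) else 0) + (if pp = x ∧ qq = y then (1:Int) else 0)
        + (if pp = x ∧ qq = j then (-1:Int) else 0) + (if pp = i ∧ qq = y then (-1:Int) else 0))
      = (fun qq => ((if pp = i ∧ qq = j then (1:Int) else 0) + (if pp = x ∧ qq = y then (1:Int) else 0)
        + (if pp = x ∧ qq = j then (-1:Int) else 0)) + (if pp = i ∧ qq = y then (-1:Int) else 0)) from rfl]
    rw [PySem.List.sum_map_add_int, PySem.List.sum_map_add_int, PySem.List.sum_map_add_int]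
    rw [pvSumIndConj (pp = i) 1 j, pvSumIndConj (pp = x) 1 y, pvSumIndConj (pp = x) (-1) j,
        pvSumIndConj (pp = i) (-1) y]
  rw [List.map_congr_left (fun pp _ => inner pp)]
  rw [show (fun pp => (if pp = i ∧ 0 ≤ j ∧ j < b + 1 then (1:Int) else 0)
        + (if pp = x ∧ 0 ≤ y ∧ y < b + 1 then (1:Int) else 0)
        + (if pp = x ∧ 0 ≤ j ∧ j < b + 1 then (-1:Int) else 0)
        + (if pp = i ∧ 0 ≤ y ∧ y < b + 1 then (-1:Int) else 0))
      = (fun pp => ((if pp = i ∧ 0 ≤ j ∧ j < b + 1 then (1:Int) else 0)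
        + (if pp = x ∧ 0 ≤ y ∧ y < b + 1 then (1:Int) else 0)
        + (if pp = x ∧ 0 ≤ j ∧ j < b + 1 then (-1:Int) else 0))
        + (if pp = i ∧ 0 ≤ y ∧ y < b + 1 then (-1:Int) else 0)) from rfl]
  rw [PySem.List.sum_map_add_int, PySem.List.sum_map_add_int, PySem.List.sum_map_add_int]
  rw [pvSumIndConj' _ 1 i, pvSumIndConj' _ 1 x, pvSumIndConj' _ (-1) x, pvSumIndConj' _ (-1) i]
  split_ifs <;> omega

theorem pvSumSwap {α : Type} (A B : List Int) :
    ∀ (rs : List α) (h : Int → Int → α → Int),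
    (A.map (fun pp => (B.map (fun qq => (rs.map (fun r => h pp qq r)).sum)).sum)).sum
    = (rs.map (fun r => (A.map (fun pp => (B.map (fun qq => h pp qq r)).sum)).sum)).sum := by
  intro rs
  induction rs with
  | nil => intro h; simp
  | cons r rs ih =>
    intro h
    simp only [List.map_cons, List.sum_cons]
    have e1 : ∀ pp : Int, (B.map (fun qq => h pp qq r + (rs.map (fun r' => h pp qq r')).sum)).sum
        = (B.map (fun qq => h pp qq r)).sum + (B.map (fun qq => (rs.map (fun r' => h pp qq r')).sum)).sum :=
      fun pp => PySem.List.sum_map_add_int B _ _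
    rw [List.map_congr_left (fun pp _ => e1 pp)]
    rw [PySem.List.sum_map_add_int A _ _, ih]

theorem pvCell_step {m : List (List Int)} {i j : Int}
    (hi0 : 0 ≤ i) (hi : i < 10) (hj0 : 0 ≤ j) (hj : j < 10)
    {c : List (List Int)} (h : pvInvC m i j c) : pvInvC m i (j + 1) (pvCumCell i c j) := by
  obtain ⟨hsh, hval⟩ := h
  set d1 : Int := if 0 < i then pvF m (i - 1) j else 0 with hd1
  set c1 : List (List Int) := if 0 < i then pvUpd c i j (pvGet c (i - 1) j) else c with hc1
  have hsh1 : pvSh c1 := by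
    rw [hc1]; by_cases hI : 0 < i
    · simp only [if_pos hI]; exact pvSh_upd hsh hi0 hi hj0 hj _
    · simp only [if_neg hI]; exact hsh
  have hval1 : ∀ p q : Int, 0 ≤ p → p < 10 → 0 ≤ q → q < 10 →
      pvGet c1 p q = pvGet c p q + (if p = i ∧ q = j then d1 else 0) := by
    intro p q hp0 hp hq0 hq
    by_cases hI : 0 < i
    · rw [hc1, hd1]
      simp only [if_pos hI]
      rw [pvGet_upd hsh hi0 hi hj0 hj _ hp0 hp hq0 hq]
      have hrd : pvGet c (i - 1) j = pvF m (i - 1) j := by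
        rw [hval (i - 1) j (by omega) (by omega) hj0 hj, if_pos (by omega)]
      rw [hrd]
    · rw [hc1, hd1]
      simp only [if_neg hI]
      simp
  set d2 : Int := if 0 < j then pvF m i (j - 1) else 0 with hd2
  set c2 : List (List Int) := if 0 < j then pvUpd c1 i j (pvGet c1 i (j - 1)) else c1 with hc2
  have hsh2 : pvSh c2 := by
    rw [hc2]; by_cases hJ : 0 < j
    · simp only [if_pos hJ]; exact pvSh_upd hsh1 hi0 hi hj0 hj _
    · simp only [if_neg hJ]; exact hsh1
  have hval2 : ∀ p q : Int, 0 ≤ p → p < 10 → 0 ≤ q → q < 10 →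
      pvGet c2 p q = pvGet c p q + (if p = i ∧ q = j then d1 + d2 else 0) := by
    intro p q hp0 hp hq0 hq
    by_cases hJ : 0 < j
    · rw [hc2]
      simp only [if_pos hJ]
      rw [pvGet_upd hsh1 hi0 hi hj0 hj _ hp0 hp hq0 hq]
      have hrd : pvGet c1 i (j - 1) = pvF m i (j - 1) := by
        rw [hval1 i (j - 1) hi0 hi (by omega) (by omega), if_neg (by omega),
            hval i (j - 1) hi0 hi (by omega) (by omega), if_pos (by omega)]
        simp
      rw [hrd, hval1 p q hp0 hp hq0 hq, hd2]
      simp only [if_pos hJ]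
      split_ifs <;> ring
    · rw [hc2, hd2]
      simp only [if_neg hJ]
      rw [hval1 p q hp0 hp hq0 hq]
      split_ifs <;> ring
  set d3 : Int := if 0 < i ∧ 0 < j then -(pvF m (i - 1) (j - 1)) else 0 with hd3
  set c3 : List (List Int) := if 0 < i ∧ 0 < j then pvUpd c2 i j (-(pvGet c2 (i - 1) (j - 1))) else c2 with hc3
  have hsh3 : pvSh c3 := by
    rw [hc3]; by_cases hIJ : 0 < i ∧ 0 < j
    · simp only [if_pos hIJ]; exact pvSh_upd hsh2 hi0 hi hj0 hj _
    · simp only [if_neg hIJ]; exact hsh2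
  have hval3 : ∀ p q : Int, 0 ≤ p → p < 10 → 0 ≤ q → q < 10 →
      pvGet c3 p q = pvGet c p q + (if p = i ∧ q = j then d1 + d2 + d3 else 0) := by
    intro p q hp0 hp hq0 hq
    by_cases hIJ : 0 < i ∧ 0 < j
    · rw [hc3]
      simp only [if_pos hIJ]
      rw [pvGet_upd hsh2 hi0 hi hj0 hj _ hp0 hp hq0 hq]
      have hrd : pvGet c2 (i - 1) (j - 1) = pvF m (i - 1) (j - 1) := by
        rw [hval2 (i - 1) (j - 1) (by omega) (by omega) (by omega) (by omega), if_neg (by omega),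
            hval (i - 1) (j - 1) (by omega) (by omega) (by omega) (by omega), if_pos (by omega)]
        simp
      rw [hrd, hval2 p q hp0 hp hq0 hq, hd3]
      simp only [if_pos hIJ]
      split_ifs <;> ring
    · rw [hc3, hd3]
      simp only [if_neg hIJ]
      rw [hval2 p q hp0 hp hq0 hq]
      split_ifs <;> ring
  have hcell : pvCumCell i c j = c3 := by
    rw [pvCumCell, hc3, hc2, hc1]
  rw [hcell]
  refine ⟨hsh3, fun p q hp0 hp hq0 hq => ?_⟩
  rw [hval3 p q hp0 hp hq0 hq, hval p q hp0 hp hq0 hq]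
  by_cases hpq : p = i ∧ q = j
  · obtain ⟨hpi, hqj⟩ := hpq
    subst hpi hqj
    rw [if_neg (by omega : ¬(p < p ∨ p = p ∧ q < q)), if_pos (show p = p ∧ q = q from ⟨rfl, rfl⟩),
        if_pos (by omega : p < p ∨ p = p ∧ q < q + 1)]
    have hD1 : d1 = pvF m (p - 1) q := by
      rw [hd1]; by_cases hI : 0 < p
      · rw [if_pos hI]
      · rw [if_neg hI, pvF_neg (by omega)]
    have hD2 : d2 = pvF m p (q - 1) := by
      rw [hd2]; by_cases hJ : 0 < q
      · rw [if_pos hJ]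
      · rw [if_neg hJ, pvF_colneg (by omega)]
    have hD3 : d3 = -(pvF m (p - 1) (q - 1)) := by
      rw [hd3]; by_cases hIJ : 0 < p ∧ 0 < q
      · rw [if_pos hIJ]
      · rw [if_neg hIJ]
        rcases not_and_or.mp hIJ with hI | hJ
        · rw [pvF_neg (by omega)]; ring
        · rw [pvF_colneg (by omega)]; ring
    rw [hD1, hD2, hD3, pvF_cell hp0 hq0]
    ring
  · rw [if_neg hpq]
    have heqv : (p < i ∨ p = i ∧ q < j + 1) ↔ (p < i ∨ p = i ∧ q < j) := by
      constructor
      · rintro (h | ⟨h1, h2⟩)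
        · exact Or.inl h
        · subst h1
          have : q ≠ j := fun hq' => hpq ⟨rfl, hq'⟩
          right; exact ⟨rfl, by omega⟩
      · rintro (h | ⟨h1, h2⟩)
        · exact Or.inl h
        · right; exact ⟨h1, by omega⟩
    by_cases hO : p < i ∨ p = i ∧ q < j
    · rw [if_pos hO, if_pos (heqv.mpr hO)]
      ring
    · rw [if_neg hO, if_neg (fun hN => hO (heqv.mp hN))]
      ring

theorem pvInner_fold {m : List (List Int)} {i : Int} (hi0 : 0 ≤ i) (hi : i < 10) :
    ∀ (fuel : Nat) (j' : Int) (c : List (List Int)), 0 ≤ j' → j' ≤ 10 → (10 - j').toNat = fuel →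
      pvInvC m i j' c → pvInvC m i 10 ((PySem.List.pyRange j' 10 1).foldl (pvCumCell i) c) := by
  intro fuel
  induction fuel with
  | zero =>
    intro j' c hj0 hjle hf h
    rw [PySem.List.pyRange_one_eq_nil (by omega)]
    have hj10 : j' = 10 := by omega
    subst hj10
    exact h
  | succ fuel ih =>
    intro j' c hj0 hjle hf h
    have hjlt : j' < 10 := by omega
    rw [show PySem.List.pyRange j' 10 1 = j' :: PySem.List.pyRange (j' + 1) 10 1 from
          PySem.List.pyRange_one_cons hjlt,
        List.foldl_cons]
    exact ih (j' + 1) _ (by omega) (by omega) (by omega) (pvCell_step hi0 hi hj0 hjlt h)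

theorem pvInv_rowshift {m : List (List Int)} {i : Int} {c : List (List Int)}
    (h : pvInvC m i 10 c) : pvInvC m (i + 1) 0 c := by
  obtain ⟨hsh, hval⟩ := h
  refine ⟨hsh, fun p q hp0 hp hq0 hq => ?_⟩
  rw [hval p q hp0 hp hq0 hq]
  have heqv : (p < i ∨ p = i ∧ q < 10) ↔ (p < i + 1 ∨ p = i + 1 ∧ q < 0) := by
    constructor
    · rintro (h | ⟨h1, h2⟩) <;> [left; left] <;> omega
    · rintro (h | ⟨h1, h2⟩)
      · rcases lt_or_eq_of_le (by omega : p ≤ i) with h' | h'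
        · exact Or.inl h'
        · exact Or.inr ⟨h', hq⟩
      · omega
  by_cases hO : p < i ∨ p = i ∧ q < 10
  · rw [if_pos hO, if_pos (heqv.mp hO)]
  · rw [if_neg hO, if_neg (fun hN => hO (heqv.mpr hN))]

theorem pvOuter_fold {m : List (List Int)} :
    ∀ (fuel : Nat) (i' : Int) (c : List (List Int)), 0 ≤ i' → i' ≤ 10 → (10 - i').toNat = fuel →
      pvInvC m i' 0 c →
      pvInvC m 10 0 ((PySem.List.pyRange i' 10 1).foldl
        (fun cum i => (PySem.List.pyRange 0 10 1).foldl (pvCumCell i) cum) c) := by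
  intro fuel
  induction fuel with
  | zero =>
    intro i' c hi0 hile hf h
    rw [show PySem.List.pyRange i' 10 1 = [] from PySem.List.pyRange_one_eq_nil (by omega)]
    have : i' = 10 := by omega
    subst this
    exact h
  | succ fuel ih =>
    intro i' c hi0 hile hf h
    have hilt : i' < 10 := by omega
    rw [show PySem.List.pyRange i' 10 1 = i' :: PySem.List.pyRange (i' + 1) 10 1 from
          PySem.List.pyRange_one_cons hilt,
        List.foldl_cons]
    refine ih (i' + 1) _ (by omega) (by omega) (by omega) ?_
    exact pvInv_rowshift (pvInner_fold hi0 hilt 10 0 c (by omega) (by omega) (by decide) h)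

theorem pvGetCum_char {m : List (List Int)} (hm : pvSh m) :
    pvSh (pvGetCum m) ∧ ∀ p q : Int, 0 ≤ p → p < 10 → 0 ≤ q → q < 10 →
      pvGet (pvGetCum m) p q = pvF m p q := by
  have hl : (m.length : Int) = 10 := by rw [hm.1]; norm_num
  have hbase : pvInvC m 0 0 m := by
    refine ⟨hm, fun p q hp0 hp hq0 hq => ?_⟩
    rw [if_neg (by omega)]
  have h10 := pvOuter_fold 10 0 m (by omega) (by omega) (by decide) hbase
  rw [pvGetCum, hl]
  obtain ⟨hsh, hval⟩ := h10
  refine ⟨hsh, fun p q hp0 hp hq0 hq => ?_⟩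
  rw [hval p q hp0 hp hq0 hq, if_pos (by omega)]

theorem pvSh_zeros : pvSh (List.replicate 10 (List.replicate 10 (0 : Int))) := by
  refine ⟨by simp, fun row h => ?_⟩
  rw [List.eq_of_mem_replicate h]
  simp

theorem pvGet_zeros {p q : Int} (hp0 : 0 ≤ p) (hp : p < 10) (hq0 : 0 ≤ q) (hq : q < 10) :
    pvGet (List.replicate 10 (List.replicate 10 (0 : Int))) p q = 0 := by
  rw [pvGet, pvGetRow, PySem.List.pyGetD_eq_getElem _ _ hp0 (by simp; omega)]
  rw [List.getElem_replicate, PySem.List.pyGetD_eq_getElem _ _ hq0 (by simp; omega)]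
  rw [List.getElem_replicate]

theorem pvFoldTake {β : Type} (f : β → List Int → β) (init : β) (N : Int)
    (rects : List (List Int)) (hN : N ≤ (rects.length : Int)) :
    (PySem.List.pyRange 0 N 1).foldl (fun s idx => f s (PySem.List.pyGetD rects idx [])) init
      = (rects.take N.toNat).foldl f init := by
  by_cases h0 : 0 ≤ N
  · have htl : (rects.take N.toNat).length = N.toNat := by
      rw [List.length_take]; omega
    have hcongr : ∀ (s : β), ∀ idx ∈ PySem.List.pyRange 0 N 1,
        f s (PySem.List.pyGetD rects idx []) = f s (PySem.List.pyGetD (rects.take N.toNat) idx []) := by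
      intro s idx hidx
      rw [PySem.List.mem_pyRange_one] at hidx
      rw [PySem.List.pyGetD_eq_getElem _ _ hidx.1 (by omega),
          PySem.List.pyGetD_eq_getElem _ _ hidx.1 (by rw [htl]; omega)]
      rw [List.getElem_take]
    rw [PySem.List.foldl_congr_mem _ _ _ _ hcongr]
    have hfold := PySem.List.foldl_pyRange_zero_pyGetD (rects.take N.toNat) ([] : List Int) f init
    rw [PySem.List.len_eq, htl, Int.toNat_of_nonneg h0] at hfold
    exact hfold
  · rw [PySem.List.pyRange_one_eq_nil (by omega)]
    have : N.toNat = 0 := by omega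
    rw [this]
    simp

theorem pvGet_cast {m : List (List Int)} (hm : pvSh m) (k l : Nat) (hk : k < 10) (hl : l < 10) :
    pvGet m (k : Int) (l : Int) =
      (m[k]'(by rw [hm.1]; omega))[l]'(by
        rw [hm.2 _ (List.getElem_mem (by rw [hm.1]; omega))]; omega) := by
  have h1 : pvGetRow m (k : Int) = m[k]'(by rw [hm.1]; omega) := by
    rw [pvGetRow, PySem.List.pyGetD_eq_getElem _ _ (by omega) (by rw [hm.1]; push_cast; omega)]
    simp
  rw [pvGet, h1, PySem.List.pyGetD_eq_getElem _ _ (by omega : (0:Int) ≤ (l : Int))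
      (by rw [hm.2 _ (List.getElem_mem (by rw [hm.1]; omega))]; push_cast; omega)]
  simp

theorem pvMat_ext {m m' : List (List Int)} (hm : pvSh m) (hm' : pvSh m')
    (h : ∀ p q : Int, 0 ≤ p → p < 10 → 0 ≤ q → q < 10 → pvGet m p q = pvGet m' p q) :
    m = m' := by
  apply List.ext_getElem
  · rw [hm.1, hm'.1]
  · intro k hk hk'
    have hk10 : k < 10 := by rw [hm.1] at hk; omega
    apply List.ext_getElem
    · rw [hm.2 _ (List.getElem_mem hk), hm'.2 _ (List.getElem_mem hk')]
    · intro l hl hl'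
      have hl10 : l < 10 := by rw [hm.2 _ (List.getElem_mem hk)] at hl; omega
      have := h (k : Int) (l : Int) (by omega) (by omega) (by omega) (by omega)
      rw [pvGet_cast hm k l hk10 hl10, pvGet_cast hm' k l hk10 hl10] at this
      exact this

theorem get_barn_eq (N : Int) (rects : List (List Int)) (hpre : Pre_get_barn N rects) :
    get_barn N rects = get_barn_alt N rects := by
  obtain ⟨hN, hall⟩ := hpre
  simp only [get_barn, get_barn_alt]
  rw [pvFoldTake pvCorner _ N rects hN, pvFoldTake pvIncRect _ N rects hN]
  set rs := rects.take N.toNat with hrs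
  obtain ⟨hAsh, hAget⟩ := pvFoldCorner hall pvSh_zeros
  obtain ⟨hCsh, hCget⟩ := pvGetCum_char hAsh
  obtain ⟨hBsh, hBget⟩ := pvFoldInc hall pvSh_zeros
  apply pvMat_ext hCsh hBsh
  intro a b ha0 ha hb0 hb
  rw [hCget a b ha0 ha hb0 hb, hBget a b ha0 ha hb0 hb, pvGet_zeros ha0 ha hb0 hb, zero_add]
  have hFeq : pvF (rs.foldl pvCorner (List.replicate 10 (List.replicate 10 0))) a b
      = ((PySem.List.pyRange 0 (a + 1) 1).map (fun pp =>
          ((PySem.List.pyRange 0 (b + 1) 1).map (fun qq =>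
            (rs.map (fun r => pvDelta r pp qq)).sum)).sum)).sum := by
    rw [pvF]
    refine congrArg _ (List.map_congr_left fun pp hpp => ?_)
    rw [PySem.List.mem_pyRange_one] at hpp
    rw [pvRowSum]
    refine congrArg _ (List.map_congr_left fun qq hqq => ?_)
    rw [PySem.List.mem_pyRange_one] at hqq
    rw [hAget pp qq (by omega) (by omega) (by omega) (by omega),
        pvGet_zeros (by omega) (by omega) (by omega) (by omega), zero_add]
  rw [hFeq, pvSumSwap _ _ rs (fun pp qq r => pvDelta r pp qq)]
  refine congrArg _ (List.map_congr_left fun r hr => ?_)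
  exact pvBox_eq (hall r hr) ha0 ha hb0 hb

-- ===== VERDICT (by name: the statement is the Claim_ definition above) =====
theorem get_barn_spec : Claim_equal_get_barn := by
  intro N rects _ hpre
  show get_barn N rects = get_barn_alt N rects
  exact get_barn_eq N rects hpre
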